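-- pv_equiv track=rewrite | github.com/mahmudurmahid/hackerrank-problem-solving-questions | questions/q1_10/q9_birthday_cake_candles.py | alt2_birthday_cake_candles
-- ===== SOURCE A (Python) =====
-- def alt2_birthday_cake_candles(arr):
--     tallest_candle = 0
--     num_tallest_candle = 0
--
--     for i in arr:
--         if i > tallest_candle:
--             tallest_candle = i
--         else:
--             tallest_candle = tallest_candle
--
--     for j in arr:
--         if j == tallest_candle:
--             num_tallest_candle += 1
--         else:
--             num_tallest_candle = num_tallest_candle
--
--     return num_tallest_candle
-- ===== SOURCE B (Python) =====
-- def alt2_birthday_cake_candles(arr):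
--     tallest = 0
--     count = 0
--     for i in arr:
--         if i > tallest:
--             tallest = i
--             count = 1
--         elif i == tallest:
--             count += 1
--     return count
-- ===== Notes on version B (the rewrite author's own statement) =====
-- stated objective: alternative
-- what changed: Replaces A's two separate scans (find max, then count equals) with a single pass that tracks the running maximum and resets/increments its count on the fly.
import Mathlib
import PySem

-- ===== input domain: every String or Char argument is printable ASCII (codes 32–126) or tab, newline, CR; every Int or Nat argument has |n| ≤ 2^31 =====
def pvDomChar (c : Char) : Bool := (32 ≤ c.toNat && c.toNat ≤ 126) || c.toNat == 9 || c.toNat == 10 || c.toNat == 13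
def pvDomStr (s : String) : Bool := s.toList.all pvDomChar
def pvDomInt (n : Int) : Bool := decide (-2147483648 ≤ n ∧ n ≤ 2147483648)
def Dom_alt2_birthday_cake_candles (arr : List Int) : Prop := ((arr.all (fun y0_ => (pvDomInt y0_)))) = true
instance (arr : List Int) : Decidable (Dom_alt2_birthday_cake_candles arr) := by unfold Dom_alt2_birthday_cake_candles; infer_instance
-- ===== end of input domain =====

-- B replaces A's two separate scans (find max, then count equals) with one pass maintaining the running max and its count (objective: alternative decomposition).

-- ===== PORT A =====
def alt2_birthday_cake_candles (arr : List Int) : Int :=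
  let tallest_candle : Int :=
    arr.foldl (fun tallest_candle i => if i > tallest_candle then i else tallest_candle) 0
  let num_tallest_candle : Int :=
    arr.foldl (fun num_tallest_candle j =>
      if j = tallest_candle then num_tallest_candle + 1 else num_tallest_candle) 0
  num_tallest_candle

-- ===== PORT B =====
def alt2_birthday_cake_candles_alt (arr : List Int) : Int :=
  let st := arr.foldl (fun (st : Int × Int) i =>
      if i > st.1 then (i, 1)
      else if i = st.1 then (st.1, st.2 + 1)
      else st) (0, 0)
  st.2

-- ===== PRECONDITION & SPEC =====
def Spec_alt2_birthday_cake_candles (arr : List Int) (out : Int) : Prop := out = alt2_birthday_cake_candles_alt arr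
instance (arr : List Int) (out : Int) : Decidable (Spec_alt2_birthday_cake_candles arr out) := by unfold Spec_alt2_birthday_cake_candles; infer_instance

-- ===== CLAIM (what is proved, stated in full; the proofs are below) =====
def Claim_equal_alt2_birthday_cake_candles : Prop := ∀ (arr : List Int), Dom_alt2_birthday_cake_candles arr → Spec_alt2_birthday_cake_candles arr (alt2_birthday_cake_candles arr)

-- ===== LEMMAS AND PROOFS =====

-- A's first pass: running max with floor t
def pvMaxf (arr : List Int) (t : Int) : Int :=
  arr.foldl (fun tallest i => if i > tallest then i else tallest) t

-- A's second pass: count of occurrences of m, starting from accumulator c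
def pvCountf (arr : List Int) (m c : Int) : Int :=
  arr.foldl (fun n j => if j = m then n + 1 else n) c

-- B's loop as a function of its state, for the invariant below
def pvBf (arr : List Int) (st : Int × Int) : Int × Int :=
  arr.foldl (fun (st : Int × Int) i =>
      if i > st.1 then (i, 1)
      else if i = st.1 then (st.1, st.2 + 1)
      else st) st

lemma pvMaxf_cons (i : Int) (rest : List Int) (t : Int) :
    pvMaxf (i :: rest) t = pvMaxf rest (if i > t then i else t) := rfl

lemma pvCountf_cons (j : Int) (rest : List Int) (m c : Int) :
    pvCountf (j :: rest) m c = pvCountf rest m (if j = m then c + 1 else c) := rfl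

lemma pvBf_cons (i : Int) (rest : List Int) (t c : Int) :
    pvBf (i :: rest) (t, c)
      = pvBf rest (if i > t then (i, 1) else if i = t then (t, c + 1) else (t, c)) := rfl

lemma le_pvMaxf (arr : List Int) (t : Int) : t ≤ pvMaxf arr t := by
  induction arr generalizing t with
  | nil => simp [pvMaxf]
  | cons i rest ih =>
    rw [pvMaxf_cons]
    by_cases h : i > t
    · rw [if_pos h]; exact le_trans (le_of_lt h) (ih i)
    · rw [if_neg h]; exact ih t

lemma pvCountf_acc (arr : List Int) (m c : Int) :
    pvCountf arr m c = c + pvCountf arr m 0 := by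
  induction arr generalizing c with
  | nil => simp [pvCountf]
  | cons j rest ih =>
    rw [pvCountf_cons, pvCountf_cons]
    by_cases h : j = m
    · rw [if_pos h, if_pos h, ih (c + 1), ih (0 + 1)]; ring
    · rw [if_neg h, if_neg h, ih c]

-- The invariant of B's single pass: from state (t, c) it reaches the final max
-- (with floor t) and the count of that max, carrying c only if the max never moved.
lemma pvBf_spec (arr : List Int) (t c : Int) :
    pvBf arr (t, c)
      = (pvMaxf arr t,
          (if pvMaxf arr t = t then c else 0) + pvCountf arr (pvMaxf arr t) 0) := by
  induction arr generalizing t c with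
  | nil => simp [pvBf, pvMaxf, pvCountf]
  | cons i rest ih =>
    rw [pvBf_cons, pvMaxf_cons]
    by_cases hgt : i > t
    · rw [if_pos hgt, if_pos hgt, ih i 1]
      have hge := le_pvMaxf rest i
      have hne : ¬ pvMaxf rest i = t := by omega
      rw [if_neg hne, pvCountf_cons]
      by_cases hm : pvMaxf rest i = i
      · rw [if_pos hm, if_pos hm.symm, pvCountf_acc rest _ (0 + 1)]
        simp only [Prod.mk.injEq, true_and]; ring
      · rw [if_neg hm, if_neg (fun h => hm h.symm)]
    · rw [if_neg hgt, if_neg hgt]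
      by_cases heq : i = t
      · rw [if_pos heq, ih t (c + 1), pvCountf_cons]
        subst heq
        by_cases hm : pvMaxf rest i = i
        · rw [if_pos hm, if_pos hm, if_pos hm.symm, pvCountf_acc rest _ (0 + 1),
              pvCountf_acc rest _ 0]
          simp only [Prod.mk.injEq, true_and]; ring
        · rw [if_neg hm, if_neg hm, if_neg (fun h => hm h.symm)]
      · rw [if_neg heq, ih t c, pvCountf_cons]
        have hge := le_pvMaxf rest t
        have hne : ¬ i = pvMaxf rest t := by omega
        rw [if_neg hne]

-- ===== VERDICT (by name: the statement is the Claim_ definition above) =====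
theorem alt2_birthday_cake_candles_spec : Claim_equal_alt2_birthday_cake_candles := by
  intro arr _
  show alt2_birthday_cake_candles arr = alt2_birthday_cake_candles_alt arr
  show pvCountf arr (pvMaxf arr 0) 0 = (pvBf arr (0, 0)).2
  rw [pvBf_spec arr 0 0]
  by_cases h : pvMaxf arr 0 = 0 <;> simp [h]
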